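-- pv_equiv track=rewrite | github.com/xxnpark/snucse | Computer Concepts and Practice/CHW7/18-B.py | first_perfect_square
-- ===== SOURCE A (Python) =====
-- def first_perfect_square(numbers):
-- 	lst = []
-- 	import math
-- 	for i in range(len(numbers)):
-- 		if numbers[i] >= 0:
-- 			k = numbers[i]
-- 			j = int(math.sqrt(k))
-- 			if int(j**2) == k:
-- 				lst.append(i)
-- 	if len(lst) == 0:
-- 		return -1
-- 	else:
-- 		return lst[0]
-- ===== SOURCE B (Python) =====
-- import math
--
-- def first_perfect_square(numbers):
--     for i, k in enumerate(numbers):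
--         if k >= 0 and math.isqrt(k) ** 2 == k:
--             return i
--     return -1
-- ===== Notes on version B (the rewrite author's own statement) =====
-- stated objective: simpler
-- what changed: Replaced A's collect-all-matching-indices-into-a-list-then-return-its-head strategy with a direct enumerate loop that returns the first qualifying index immediately and maintains no accumulator (using exact math.isqrt, which agrees with int(math.sqrt(k)) for k <= 2^31).
import Mathlib
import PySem

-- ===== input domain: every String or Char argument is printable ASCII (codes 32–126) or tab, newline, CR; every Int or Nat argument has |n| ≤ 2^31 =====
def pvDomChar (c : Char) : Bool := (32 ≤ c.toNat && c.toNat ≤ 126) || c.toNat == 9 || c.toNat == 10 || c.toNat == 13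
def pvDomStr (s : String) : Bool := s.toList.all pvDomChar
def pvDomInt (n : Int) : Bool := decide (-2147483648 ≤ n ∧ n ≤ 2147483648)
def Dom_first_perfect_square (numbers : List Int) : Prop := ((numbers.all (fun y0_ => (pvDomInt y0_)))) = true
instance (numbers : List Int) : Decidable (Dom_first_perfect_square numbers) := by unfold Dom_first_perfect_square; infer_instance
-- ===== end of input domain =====

-- B is a direct find-first-and-exit loop instead of A's collect-all-matches list; return values proved equal on Dom.

-- ===== PORT A =====
-- int(math.sqrt(k)) for 0 ≤ k: exact equal to the integer square root for |k| ≤ 2^31 (the Dom bound),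
-- since k and its square root are represented exactly enough by IEEE doubles there.
def pvIsqrt (k : Int) : Int := Int.ofNat (Int.toNat k).sqrt

-- the loop body of A: for i in range(len(numbers)): if numbers[i] >= 0: … lst.append(i)
def pvStepA (full : List Int) (lst : List Int) (i : Nat) : List Int :=
  if full.getD i 0 ≥ 0 then
    let k := full.getD i 0
    let j := pvIsqrt k
    if j ^ 2 = k then lst ++ [(i : Int)] else lst
  else lst

def first_perfect_square (numbers : List Int) : Int :=
  let lst := (List.range numbers.length).foldl (pvStepA numbers) []
  if lst = [] then -1 else lst.headD (-1)   -- lst[0] on a nonempty list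

-- ===== PORT B =====
-- math.isqrt(k)**2 == k test; guarded by k >= 0 as in Source B
def pvFindB : List Int → Int → Int
  | [], _ => -1
  | k :: rest, i => if 0 ≤ k ∧ (pvIsqrt k) ^ 2 = k then i else pvFindB rest (i + 1)

def first_perfect_square_alt (numbers : List Int) : Int := pvFindB numbers 0

-- ===== PRECONDITION & SPEC =====
def Spec_first_perfect_square (numbers : List Int) (out : Int) : Prop := out = first_perfect_square_alt numbers
instance (numbers : List Int) (out : Int) : Decidable (Spec_first_perfect_square numbers out) := by unfold Spec_first_perfect_square; infer_instance

-- ===== CLAIM (what is proved, stated in full; the proofs are below) =====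
def Claim_equal_first_perfect_square : Prop := ∀ (numbers : List Int), Dom_first_perfect_square numbers → Spec_first_perfect_square numbers (first_perfect_square numbers)

-- ===== LEMMAS AND PROOFS =====

-- the shared predicate
def pvP (n : Int) : Bool := decide (0 ≤ n) && decide ((pvIsqrt n) ^ 2 = n)

theorem pvStepA_eq (full lst : List Int) (i : Nat) :
    pvStepA full lst i = if pvP (full.getD i 0) then lst ++ [(i : Int)] else lst := by
  simp only [pvStepA, pvP, ge_iff_le, Bool.and_eq_true, decide_eq_true_eq]
  split_ifs with h1 h2 h3 h3 <;> first | rfl | (exfalso; omega)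

-- the list of (matching) indices A collects, written as a front recursion
def pvIdxs : List Int → Nat → List Int
  | [], _ => []
  | n :: rest, s => if pvP n then (s : Int) :: pvIdxs rest (s + 1) else pvIdxs rest (s + 1)

theorem pvIdxs_append (l : List Int) (x : Int) : ∀ s : Nat,
    pvIdxs (l ++ [x]) s = pvIdxs l s ++ (if pvP x then [((s + l.length : Nat) : Int)] else []) := by
  induction l with
  | nil => intro s; simp [pvIdxs]
  | cons n rest ih =>
    intro s
    simp only [List.cons_append, pvIdxs, ih (s + 1), List.length_cons]
    split_ifs <;> simp <;> ring_nf

theorem pvCollect_eq (numbers : List Int) :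
    (List.range numbers.length).foldl (pvStepA numbers) [] = pvIdxs numbers 0 := by
  induction numbers using List.reverseRecOn with
  | nil => simp [pvIdxs]
  | append_singleton l x ih =>
    rw [List.length_append, List.length_singleton, List.range_succ, List.foldl_append]
    have hcong : (List.range l.length).foldl (pvStepA (l ++ [x])) [] =
        (List.range l.length).foldl (pvStepA l) [] := by
      apply List.foldl_ext
      intro acc i hi
      have hi' : i < l.length := List.mem_range.mp hi
      simp [pvStepA_eq, List.getElem?_append_left hi']
    have hx : (l ++ [x]).getD l.length 0 = x := by
      simp [List.getD_eq_getElem?_getD]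
    simp only [List.foldl_cons, List.foldl_nil, hcong, ih, pvStepA_eq, hx,
      pvIdxs_append l x 0]
    split_ifs <;> simp

theorem pvHead_idxs (l : List Int) : ∀ s : Nat,
    (if pvIdxs l s = [] then (-1 : Int) else (pvIdxs l s).headD (-1)) = pvFindB l (s : Int) := by
  induction l with
  | nil => intro s; simp [pvIdxs, pvFindB]
  | cons n rest ih =>
    intro s
    have hcast : ((s : Int) + 1) = ((s + 1 : Nat) : Int) := by push_cast; ring
    by_cases hp : pvP n = true
    · have hb : (0 ≤ n ∧ (pvIsqrt n) ^ 2 = n) := by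
        simpa [pvP, Bool.and_eq_true, decide_eq_true_eq] using hp
      simp [pvIdxs, pvFindB, hp, hb]
    · have hb : ¬ (0 ≤ n ∧ (pvIsqrt n) ^ 2 = n) := by
        simpa [pvP, Bool.and_eq_true, decide_eq_true_eq] using hp
      simp only [pvIdxs, pvFindB, hp, if_neg hb, hcast]
      exact ih (s + 1)

-- ===== VERDICT (by name: the statement is the Claim_ definition above) =====
theorem first_perfect_square_spec : Claim_equal_first_perfect_square := by
  intro numbers _
  unfold Spec_first_perfect_square first_perfect_square first_perfect_square_alt
  simp only [pvCollect_eq]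
  simpa using pvHead_idxs numbers 0
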